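-- pv_equiv track=rewrite | github.com/youngjaekwon/Algorithm | 프로그래머스/lv0/120863. 다항식 더하기/다항식 더하기.py | solution
-- ===== SOURCE A (Python) =====
-- def solution(polynomial):
--     xt = 0
--     t = 0
--     for x in polynomial.split():
--         if "x" in x:
--             x = x.replace("x", "")
--             xt += int(x) if x else 1
--         elif x == "+":
--             continue
--         else:
--             t += int(x)
--     if xt > 1 and t:
--         return f"{xt}x + {t}"
--     elif xt and t:
--         return f"x + {t}"
--     elif xt > 1:
--         return f"{xt}x"
--     elif xt:
--         return f"x"
--     else:
--         return f"{t}"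
-- ===== SOURCE B (Python) =====
-- def _flush(buf, has_x, xt, t):
--     if has_x:
--         xt += int(buf) if buf else 1
--     elif buf != "+":
--         t += int(buf)
--     return xt, t
--
--
-- def solution(polynomial):
--     xt, t = 0, 0
--     buf, has_x = "", False
--     for c in polynomial:
--         if c.isspace():
--             if buf or has_x:
--                 xt, t = _flush(buf, has_x, xt, t)
--                 buf, has_x = "", False
--         elif c == "x":
--             has_x = True
--         else:
--             buf += c
--     if buf or has_x:
--         xt, t = _flush(buf, has_x, xt, t)
--     parts = []
--     if xt:
--         parts.append("x" if xt == 1 else f"{xt}x")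
--     if t:
--         parts.append(str(t))
--     return " + ".join(parts) or "0"
-- ===== Notes on version B (the rewrite author's own statement) =====
-- stated objective: alternative
-- what changed: Replaces split()/replace()/int-per-token plus the five-way if/elif formatting cascade by a single hand-written character scanner (one pass over the characters with a residue buffer and an has_x flag, flushed at whitespace) followed by building a list of rendered terms joined with ' + ' (empty join falls back to '0').
-- intended difference: On inputs whose x-coefficient sum is negative (e.g. '-2x'), A falls into its unit-coefficient branch and returns 'x' (or 'x + t'), silently dropping the negative coefficient; B prints the real coefficient ('-2x'), which is the intended rendering of the summed polynomial. — e.g. on solution("-2x"): A returns "x", B returns "-2x"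
import Mathlib
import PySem

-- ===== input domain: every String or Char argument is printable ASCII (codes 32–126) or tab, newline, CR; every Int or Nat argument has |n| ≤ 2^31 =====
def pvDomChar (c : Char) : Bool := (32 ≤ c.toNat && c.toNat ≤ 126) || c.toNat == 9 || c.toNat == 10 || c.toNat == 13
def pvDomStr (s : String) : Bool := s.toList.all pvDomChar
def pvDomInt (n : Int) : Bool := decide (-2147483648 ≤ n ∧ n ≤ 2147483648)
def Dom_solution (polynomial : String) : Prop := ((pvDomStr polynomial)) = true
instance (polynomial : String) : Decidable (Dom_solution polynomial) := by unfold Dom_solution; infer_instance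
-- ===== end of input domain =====

-- B replaces A's split()/replace()/int-per-token loop + five-way if/elif cascade by a single
-- hand-written character scanner (residue buffer + has_x flag, flushed at whitespace) and a
-- join of rendered term strings (objective: alternative); on inputs whose x-coefficient sum is
-- negative A prints "x", dropping the coefficient — B prints the real coefficient (see D_).


-- ===== PORT A =====
def solution (polynomial : String) : String :=
  let st : Int × Int := (PySem.Str.split₀ polynomial).foldl
    (fun (p : Int × Int) x =>
      if PySem.Str.isIn "x" x then
        let x' := PySem.Str.replace x "x" ""
        (p.1 + (if x' ≠ "" then (PySem.Int.ofStr? x').getD 0 else 1), p.2)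
      else if x = "+" then p
      else (p.1, p.2 + (PySem.Int.ofStr? x).getD 0))
    (0, 0)
  let xt := st.1
  let t := st.2
  if 1 < xt ∧ t ≠ 0 then PySem.Int.toStr xt ++ "x + " ++ PySem.Int.toStr t
  else if xt ≠ 0 ∧ t ≠ 0 then "x + " ++ PySem.Int.toStr t
  else if 1 < xt then PySem.Int.toStr xt ++ "x"
  else if xt ≠ 0 then "x"
  else PySem.Int.toStr t

-- ===== PORT B =====
-- helper _flush of Source B: close the current token (buf = its non-'x' chars, in order);
-- Pre_ excludes the inputs where Python's int() raises, so .getD 0 is never taken there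
def solution_alt_flush (buf : List Char) (hasX : Bool) (p : Int × Int) : Int × Int :=
  if hasX then (p.1 + (if buf ≠ [] then (PySem.Int.ofChars? buf).getD 0 else 1), p.2)
  else if buf = ['+'] then p
  else (p.1, p.2 + (PySem.Int.ofChars? buf).getD 0)

-- Source B's for-loop over the characters, plus the trailing flush after the loop
def solution_alt_go : List Char → List Char → Bool → Int × Int → Int × Int
  | [], buf, hasX, p => if buf ≠ [] ∨ hasX = true then solution_alt_flush buf hasX p else p
  | c :: cs, buf, hasX, p =>
    if PySem.Chars.isspace c then
      if buf ≠ [] ∨ hasX = true then solution_alt_go cs [] false (solution_alt_flush buf hasX p)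
      else solution_alt_go cs buf hasX p
    else if c = 'x' then solution_alt_go cs buf true p
    else solution_alt_go cs (buf ++ [c]) hasX p

def solution_alt (polynomial : String) : String :=
  let st := solution_alt_go polynomial.toList [] false (0, 0)
  let xt := st.1
  let t := st.2
  let parts : List String :=
    (if xt ≠ 0 then [if xt = 1 then "x" else PySem.Int.toStr xt ++ "x"] else []) ++
    (if t ≠ 0 then [PySem.Int.toStr t] else [])
  let j := PySem.Str.join " + " parts
  if j = "" then "0" else j

-- ===== PRECONDITION & SPEC =====
-- Pre_ excludes exactly the inputs where Python's int() raises ValueError in A (a non-"+"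
-- token without "x" that is not an integer literal, or an "x"-token whose residue after
-- removing the "x"s is neither empty nor an integer literal).
def Pre_solution (polynomial : String) : Prop :=
  ∀ tok ∈ PySem.Str.split₀ polynomial,
    if PySem.Str.isIn "x" tok then
      PySem.Str.replace tok "x" "" = "" ∨ (PySem.Int.ofStr? (PySem.Str.replace tok "x" "")).isSome
    else tok = "+" ∨ (PySem.Int.ofStr? tok).isSome

instance (polynomial : String) : Decidable (Pre_solution polynomial) := by
  unfold Pre_solution; infer_instance

def pvWitness_solution : String := "3x + 2x + 5"

-- the mathematical x-coefficient a token of the input denotes: the integer named by its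
-- non-'x' characters (1 when there are none); 0 for a token with no 'x'
def pvTermCoeff (cs : List Char) : Int :=
  match PySem.Int.ofChars? (cs.filter (fun c => c ≠ 'x')) with
  | some n => n
  | none => 1

-- the x-coefficient sum a list of words denotes
def pvXSum : List String → Int
  | [] => 0
  | tok :: rest => (if 'x' ∈ tok.toList then pvTermCoeff tok.toList else 0) + pvXSum rest

-- the x-coefficient sum the input's whitespace-separated words denote
def pvXSumOf (s : String) : Int := pvXSum (PySem.Str.split₀ s)

-- On inputs whose summed x-coefficient is negative, A returns "x" (or "x + t"), silently
-- dropping the coefficient; B returns the actual coefficient (e.g. "-2x"), the intended rendering.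
def D_solution (polynomial : String) : Prop := pvXSumOf polynomial < 0

instance (polynomial : String) : Decidable (D_solution polynomial) := by
  unfold D_solution; infer_instance

def Spec_solution (polynomial : String) (out : String) : Prop :=
  ¬ D_solution polynomial → out = solution_alt polynomial
instance (polynomial : String) (out : String) : Decidable (Spec_solution polynomial out) := by
  unfold Spec_solution; infer_instance

def pvDiffWitness_solution : String := "-2x"
def pvDiffWitnessOut_solution : String × String := ("x", "-2x")

-- ===== CLAIM (what is proved, stated in full; the proofs are below) =====
def Claim_unchanged_solution : Prop := ∀ (polynomial : String), Dom_solution polynomial → Pre_solution polynomial → Spec_solution polynomial (solution polynomial)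
def Claim_changed_solution : Prop := Dom_solution (pvDiffWitness_solution) ∧ Pre_solution (pvDiffWitness_solution) ∧ D_solution (pvDiffWitness_solution) ∧ solution (pvDiffWitness_solution) = pvDiffWitnessOut_solution.1 ∧ solution_alt (pvDiffWitness_solution) = pvDiffWitnessOut_solution.2 ∧ pvDiffWitnessOut_solution.1 ≠ pvDiffWitnessOut_solution.2
def Claim_exact_solution : Prop := ∀ (polynomial : String), Dom_solution polynomial → Pre_solution polynomial → D_solution polynomial → solution polynomial ≠ solution_alt polynomial

-- ===== LEMMAS AND PROOFS =====

-- the per-token function of A's fold, named for the lemmas below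
def pvStepA (p : Int × Int) (x : String) : Int × Int :=
  if PySem.Str.isIn "x" x then
    let x' := PySem.Str.replace x "x" ""
    (p.1 + (if x' ≠ "" then (PySem.Int.ofStr? x').getD 0 else 1), p.2)
  else if x = "+" then p
  else (p.1, p.2 + (PySem.Int.ofStr? x).getD 0)

-- the per-token coefficient B's flush adds, as A's fold step computes it (used by pv_sum_eq)
def solution_alt_coeff (tok : String) : Int :=
  let s := PySem.Str.replace tok "x" ""
  if s ≠ "" then (PySem.Int.ofStr? s).getD 0 else 1

theorem pv_toStr_ne_empty (n : Int) : PySem.Int.toStr n ≠ "" := by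
  intro he
  have h2 : (PySem.Int.toStr n).toList = [] := by rw [he]; rfl
  rw [PySem.Int.toList_toStr] at h2
  unfold PySem.Int.toChars at h2
  split at h2
  · simp at h2
  · have h3 : 0 < (Nat.toDigits 10 (Int.toNat n)).length := Nat.length_toDigits_pos
    rw [h2] at h3; simp at h3

theorem pv_join_two (a b : String) : PySem.Str.join " + " [a, b] = a ++ " + " ++ b := by
  simp [PySem.Str.join, PySem.Chars.join_cons_cons, PySem.Chars.join_singleton,
    String.ofList_append]
  rw [show (' ' :: '+' :: ' ' :: b.toList) = " + ".toList ++ b.toList from rfl,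
    String.ofList_append]
  simp [String.append_assoc]

theorem pv_join_one (a : String) : PySem.Str.join " + " [a] = a := by
  simp [PySem.Str.join, PySem.Chars.join_singleton]

theorem pv_join_nil : PySem.Str.join " + " ([] : List String) = "" := by
  simp [PySem.Str.join, PySem.Chars.join_nil]

theorem pv_append_ne_empty (a b : String) (h : b ≠ "") : a ++ b ≠ "" := by
  simp [h]

theorem pv_toList_eq_nil (s : String) : s = "" ↔ s.toList = [] := by
  constructor
  · intro h; rw [h]; rfl
  · intro h
    have := congrArg String.ofList h
    simpa using this

theorem pv_singleton_infix (l : List Char) (c : Char) : [c] <:+: l ↔ c ∈ l := by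
  constructor
  · intro h; exact h.mem (by simp)
  · intro h
    obtain ⟨s, t, rfl⟩ := List.append_of_mem h
    exact ⟨s, t, by simp⟩

theorem pv_isIn_x (s : String) : PySem.Str.isIn "x" s = true ↔ 'x' ∈ s.toList := by
  rw [show PySem.Str.isIn "x" s = PySem.Chars.isIn ['x'] s.toList from by simp,
    PySem.Chars.isIn_iff_infix, pv_singleton_infix]

-- Python's tok.replace("x","") removes exactly the 'x' characters
theorem pv_replace_go_filter (l : List Char) (acc : List Char) (fuel : Nat)
    (h : l.length ≤ fuel) :
    PySem.Chars.replace.go ['x'] [] fuel l acc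
      = acc.reverse ++ l.filter (fun c => c ≠ 'x') := by
  induction l generalizing fuel acc with
  | nil => cases fuel <;> simp [PySem.Chars.replace.go]
  | cons c t ih =>
    cases fuel with
    | zero => simp at h
    | succ fuel =>
      by_cases hc : c = 'x'
      · subst hc
        rw [show PySem.Chars.replace.go ['x'] [] (fuel+1) ('x' :: t) acc
            = PySem.Chars.replace.go ['x'] [] fuel t acc from by
          simp [PySem.Chars.replace.go]]
        rw [ih acc fuel (by simpa using h)]
        simp
      · rw [show PySem.Chars.replace.go ['x'] [] (fuel+1) (c :: t) acc
            = PySem.Chars.replace.go ['x'] [] fuel t (c :: acc) from by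
          simp [PySem.Chars.replace.go, List.isPrefixOf, Ne.symm hc]]
        rw [ih (c :: acc) fuel (by simpa using h)]
        simp [hc]

theorem pv_replace_x (s : List Char) :
    PySem.Chars.replace s ['x'] [] = s.filter (fun c => c ≠ 'x') := by
  rw [PySem.Chars.replace, if_neg (by simp), pv_replace_go_filter s [] s.length le_rfl]
  rfl

-- split₀.go prepends the already-collected tokens
theorem pv_split_go_acc (cs : List Char) (cur : List Char) (acc : List (List Char)) :
    PySem.Chars.split₀.go cs cur acc = acc.reverse ++ PySem.Chars.split₀.go cs cur [] := by
  induction cs generalizing cur acc with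
  | nil =>
    by_cases hc : cur.isEmpty
    · simp [PySem.Chars.split₀.go, hc]
    · simp [PySem.Chars.split₀.go, hc]
  | cons c cs ih =>
    by_cases hs : PySem.Chars.isspace c
    · by_cases hc : cur.isEmpty
      · simp only [PySem.Chars.split₀.go, hs, if_true, hc]
        exact ih [] acc
      · simp only [PySem.Chars.split₀.go, hs, if_true, hc, if_false]
        rw [ih [] (cur.reverse :: acc), ih [] [cur.reverse]]
        simp
    · simp only [PySem.Chars.split₀.go, hs, if_false]
      exact ih (c :: cur) acc

-- a token is nonempty iff its buffer is nonempty or it contains an 'x'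
theorem pv_cur_ne_nil (cur : List Char) :
    ((cur.filter (fun c => c ≠ 'x')).reverse ≠ [] ∨ decide ('x' ∈ cur) = true) ↔ cur ≠ [] := by
  constructor
  · rintro (h | h)
    · intro he; subst he; simp at h
    · intro he; subst he; simp at h
  · intro h
    by_cases hx : 'x' ∈ cur
    · right; simpa using hx
    · left
      simp only [ne_eq, List.reverse_eq_nil_iff, List.filter_eq_nil_iff]
      push_neg
      rcases cur with _ | ⟨c, cur⟩
      · exact absurd rfl h
      · exact ⟨c, by simp, by simp; intro hc; exact hx (by simp [hc])⟩

-- B's flush on a token's buffer computes A's step on that token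
theorem pv_flush_eq (tok : List Char) (p : Int × Int) :
    solution_alt_flush (tok.filter (fun c => c ≠ 'x')) (decide ('x' ∈ tok)) p
      = pvStepA p (String.ofList tok) := by
  have hrep : (PySem.Str.replace (String.ofList tok) "x" "").toList
      = tok.filter (fun c => c ≠ 'x') := by
    rw [PySem.Str.toList_replace]
    simp [pv_replace_x]
  by_cases hx : 'x' ∈ tok
  · rw [solution_alt_flush, if_pos (by simpa using hx)]
    rw [pvStepA, if_pos ((pv_isIn_x _).mpr (by simpa using hx))]
    show _ = (p.1 + (if PySem.Str.replace (String.ofList tok) "x" "" ≠ "" then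
        (PySem.Int.ofStr? (PySem.Str.replace (String.ofList tok) "x" "")).getD 0 else 1), p.2)
    have hres : (PySem.Str.replace (String.ofList tok) "x" "" ≠ "")
        ↔ tok.filter (fun c => c ≠ 'x') ≠ [] := by
      rw [ne_eq, pv_toList_eq_nil, hrep]
    have hof : PySem.Int.ofStr? (PySem.Str.replace (String.ofList tok) "x" "")
        = PySem.Int.ofChars? (tok.filter (fun c => c ≠ 'x')) := by
      rw [PySem.Int.ofStr?, hrep]
    by_cases hne : tok.filter (fun c => c ≠ 'x') = []
    · rw [if_neg (by simpa using hne), if_neg (by rw [hres]; simpa using hne)]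
    · rw [if_pos (by simpa using hne), if_pos (hres.mpr hne), hof]
  · have hfil : tok.filter (fun c => c ≠ 'x') = tok :=
      List.filter_eq_self.mpr (fun c hc => by simp; intro he; exact hx (he ▸ hc))
    have hIs : ¬ PySem.Str.isIn "x" (String.ofList tok) = true := by
      rw [pv_isIn_x]; simpa using hx
    have hplus : (String.ofList tok = "+") ↔ tok = ['+'] := by
      constructor
      · intro h; have := congrArg String.toList h; simpa using this
      · intro h; subst h; rfl
    rw [solution_alt_flush, if_neg (by simpa using hx), hfil, pvStepA, if_neg hIs]
    by_cases hp : tok = ['+']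
    · rw [if_pos hp, if_pos (hplus.mpr hp)]
    · rw [if_neg hp, if_neg (fun h => hp (hplus.mp h)), PySem.Int.ofStr?]
      simp

-- the fold function written in port A is pvStepA
theorem pv_stepA_def : (fun (p : Int × Int) (x : String) =>
      if PySem.Str.isIn "x" x then
        let x' := PySem.Str.replace x "x" ""
        (p.1 + (if x' ≠ "" then (PySem.Int.ofStr? x').getD 0 else 1), p.2)
      else if x = "+" then p
      else (p.1, p.2 + (PySem.Int.ofStr? x).getD 0)) = pvStepA := rfl

-- MAIN: B's character scanner computes A's fold over the split tokens
theorem pv_scan_eq (cs : List Char) (cur : List Char) (p : Int × Int) :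
    solution_alt_go cs ((cur.filter (fun c => c ≠ 'x')).reverse) (decide ('x' ∈ cur)) p
      = ((PySem.Chars.split₀.go cs cur []).map String.ofList).foldl pvStepA p := by
  induction cs generalizing cur p with
  | nil =>
    by_cases hc : cur = []
    · subst hc
      simp [solution_alt_go, PySem.Chars.split₀.go]
    · rw [solution_alt_go, if_pos ((pv_cur_ne_nil cur).mpr hc)]
      rw [show PySem.Chars.split₀.go [] cur [] = [cur.reverse] from by
        simp [PySem.Chars.split₀.go, List.isEmpty_iff, hc]]
      rw [List.map_cons, List.map_nil, List.foldl_cons, List.foldl_nil]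
      rw [show (cur.filter (fun c => c ≠ 'x')).reverse
          = cur.reverse.filter (fun c => c ≠ 'x') from by simp,
        show decide ('x' ∈ cur) = decide ('x' ∈ cur.reverse) from by simp]
      exact pv_flush_eq cur.reverse p
  | cons c cs ih =>
    by_cases hs : PySem.Chars.isspace c
    · by_cases hc : cur = []
      · subst hc
        rw [solution_alt_go, if_pos hs,
          if_neg (by rw [pv_cur_ne_nil]; simp),
          show PySem.Chars.split₀.go (c :: cs) [] [] = PySem.Chars.split₀.go cs [] [] from by
            simp [PySem.Chars.split₀.go, hs]]
        exact ih [] p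
      · rw [solution_alt_go, if_pos hs, if_pos ((pv_cur_ne_nil cur).mpr hc)]
        rw [show PySem.Chars.split₀.go (c :: cs) cur []
            = cur.reverse :: PySem.Chars.split₀.go cs [] [] from by
          rw [show PySem.Chars.split₀.go (c :: cs) cur []
              = PySem.Chars.split₀.go cs [] [cur.reverse] from by
            simp [PySem.Chars.split₀.go, hs, List.isEmpty_iff, hc]]
          rw [pv_split_go_acc]; simp]
        rw [List.map_cons, List.foldl_cons]
        rw [show (cur.filter (fun c => c ≠ 'x')).reverse
            = cur.reverse.filter (fun c => c ≠ 'x') from by simp,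
          show decide ('x' ∈ cur) = decide ('x' ∈ cur.reverse) from by simp,
          pv_flush_eq cur.reverse p]
        exact ih [] _
    · rw [show PySem.Chars.split₀.go (c :: cs) cur []
          = PySem.Chars.split₀.go cs (c :: cur) [] from by
        simp [PySem.Chars.split₀.go, hs]]
      by_cases hcx : c = 'x'
      · subst hcx
        rw [solution_alt_go, if_neg (by simp [hs]), if_pos rfl]
        have := ih ('x' :: cur) p
        simpa using this
      · rw [solution_alt_go, if_neg (by simp [hs]), if_neg hcx]
        have := ih (c :: cur) p
        rw [show ((c :: cur).filter (fun c => c ≠ 'x')).reverse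
            = (cur.filter (fun c => c ≠ 'x')).reverse ++ [c] from by simp [hcx],
          show decide ('x' ∈ c :: cur) = decide ('x' ∈ cur) from by simp [Ne.symm hcx]] at this
        exact this

-- A's single fold computes the two per-kind sums (used to read D_ off A's accumulator)
theorem pv_fold_eq (toks : List String) (p : Int × Int) :
    toks.foldl pvStepA p
    = (p.1 + ((toks.filter (fun tok => PySem.Str.isIn "x" tok)).map solution_alt_coeff).sum,
       p.2 + ((toks.filter (fun tok => !PySem.Str.isIn "x" tok && tok ≠ "+")).map
          (fun tok => (PySem.Int.ofStr? tok).getD 0)).sum) := by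
  induction toks generalizing p with
  | nil => simp
  | cons x toks ih =>
    cases hx : PySem.Str.isIn "x" x with
    | true =>
      simp only [List.foldl_cons, List.filter_cons, hx, if_true, ih, List.map_cons,
        List.sum_cons, solution_alt_coeff, pvStepA, Bool.not_true, Bool.false_and,
        Bool.false_eq_true, if_false]
      refine Prod.ext ?_ rfl
      dsimp only
      ring
    | false =>
      by_cases hp : x = "+"
      · subst hp
        simp only [List.foldl_cons, List.filter_cons, hx, Bool.false_eq_true, if_false,
          eq_self_iff_true, if_true, Bool.not_false, pvStepA,
          show (decide (("+" : String) ≠ "+")) = false from by decide, Bool.and_false]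
        exact ih p
      · simp only [List.foldl_cons, List.filter_cons, hx, Bool.false_eq_true, if_false,
          if_neg hp, Bool.not_false, Bool.true_and, pvStepA,
          show decide (x ≠ "+") = true by simp [hp], if_true, List.map_cons, List.sum_cons, ih]
        refine Prod.ext rfl ?_
        dsimp only
        ring

-- within Pre_, the stated coefficient of an "x"-token is what A's step adds for it
theorem pv_coeff_eq (tok : String)
    (hx : PySem.Str.isIn "x" tok = true)
    (hp : PySem.Str.replace tok "x" "" = "" ∨ (PySem.Int.ofStr? (PySem.Str.replace tok "x" "")).isSome) :
    pvTermCoeff tok.toList = solution_alt_coeff tok := by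
  have hrep : (PySem.Str.replace tok "x" "").toList = tok.toList.filter (fun c => c ≠ 'x') := by
    rw [PySem.Str.toList_replace]
    exact pv_replace_x tok.toList
  have hof : PySem.Int.ofStr? (PySem.Str.replace tok "x" "")
      = PySem.Int.ofChars? (tok.toList.filter (fun c => c ≠ 'x')) := by
    rw [PySem.Int.ofStr?, hrep]
  rcases hp with hp | hp
  · have hfil : tok.toList.filter (fun c => c ≠ 'x') = [] := by
      rw [← hrep, ← pv_toList_eq_nil]; exact hp
    unfold pvTermCoeff solution_alt_coeff
    rw [hfil]
    rw [if_neg (by simpa using hp)]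
    rfl
  · obtain ⟨n, hn⟩ := Option.isSome_iff_exists.mp hp
    unfold pvTermCoeff solution_alt_coeff
    rw [← hof, hn]
    have hne : ¬ PySem.Str.replace tok "x" "" = "" := by
      intro he
      rw [he] at hn
      rw [show PySem.Int.ofStr? "" = none from by decide] at hn
      cases hn
    rw [if_pos hne, hn]
    rfl

-- within Pre_, D_'s coefficient sum is the fold's first component
theorem pv_sum_eq (toks : List String)
    (hpre : ∀ tok ∈ toks,
      if PySem.Str.isIn "x" tok then
        PySem.Str.replace tok "x" "" = "" ∨ (PySem.Int.ofStr? (PySem.Str.replace tok "x" "")).isSome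
      else tok = "+" ∨ (PySem.Int.ofStr? tok).isSome) :
    pvXSum toks
      = ((toks.filter (fun tok => PySem.Str.isIn "x" tok)).map solution_alt_coeff).sum := by
  induction toks with
  | nil => rfl
  | cons tok toks ih =>
    have htl := fun t ht => hpre t (List.mem_cons_of_mem _ ht)
    have hhd := hpre tok (List.mem_cons_self ..)
    cases hx : PySem.Str.isIn "x" tok with
    | true =>
      rw [if_pos hx] at hhd
      rw [pvXSum, List.filter_cons, if_pos hx, List.map_cons,
        List.sum_cons, if_pos ((pv_isIn_x tok).mp hx), pv_coeff_eq tok hx hhd, ih htl]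
    | false =>
      have hmem : ¬ 'x' ∈ tok.toList := fun hm => by
        rw [(pv_isIn_x tok).mpr hm] at hx; cases hx
      rw [pvXSum, if_neg hmem]
      simp only [List.filter_cons, hx, Bool.false_eq_true, if_false, zero_add]
      exact ih htl

-- A's five-way cascade agrees with B's parts-and-join rendering whenever 0 ≤ X
theorem pv_format (X T : Int) (hX : 0 ≤ X) :
    (if 1 < X ∧ T ≠ 0 then PySem.Int.toStr X ++ "x + " ++ PySem.Int.toStr T
     else if X ≠ 0 ∧ T ≠ 0 then "x + " ++ PySem.Int.toStr T
     else if 1 < X then PySem.Int.toStr X ++ "x"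
     else if X ≠ 0 then "x"
     else PySem.Int.toStr T)
    = (if PySem.Str.join " + "
          ((if X ≠ 0 then [if X = 1 then "x" else PySem.Int.toStr X ++ "x"] else []) ++
            (if T ≠ 0 then [PySem.Int.toStr T] else [])) = "" then "0"
       else PySem.Str.join " + "
          ((if X ≠ 0 then [if X = 1 then "x" else PySem.Int.toStr X ++ "x"] else []) ++
            (if T ≠ 0 then [PySem.Int.toStr T] else []))) := by
  by_cases ht : T = 0
  · subst ht
    rcases (show X = 0 ∨ X = 1 ∨ 1 < X by omega) with h | h | h
    · subst h
      norm_num [pv_join_nil]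
      decide
    · subst h
      norm_num [pv_join_one]
      decide
    · rw [if_neg (by simp : ¬(1 < X ∧ (0:Int) ≠ 0)), if_neg (by simp : ¬(X ≠ 0 ∧ (0:Int) ≠ 0)),
        if_pos h, if_pos (by omega : X ≠ 0), if_neg (by omega : ¬X = 1),
        if_neg (by simp : ¬(0:Int) ≠ 0), List.append_nil, pv_join_one,
        if_neg (pv_append_ne_empty _ "x" (by decide))]
  · rcases (show X = 0 ∨ X = 1 ∨ 1 < X by omega) with h | h | h
    · subst h
      rw [if_neg (by omega : ¬((1:Int) < 0 ∧ T ≠ 0)), if_neg (by omega : ¬((0:Int) ≠ 0 ∧ T ≠ 0)),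
        if_neg (by omega : ¬(1:Int) < 0), if_neg (by omega : ¬(0:Int) ≠ 0),
        if_neg (by omega : ¬(0:Int) ≠ 0), if_pos ht, List.nil_append, pv_join_one,
        if_neg (pv_toStr_ne_empty T)]
    · subst h
      rw [if_neg (by omega : ¬((1:Int) < 1 ∧ T ≠ 0)), if_pos (⟨by omega, ht⟩ : ((1:Int) ≠ 0 ∧ T ≠ 0)),
        if_pos (by omega : (1:Int) ≠ 0), if_pos rfl, if_pos ht, List.singleton_append, pv_join_two,
        if_neg (pv_append_ne_empty _ _ (pv_toStr_ne_empty T))]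
      rfl
    · rw [if_pos ⟨h, ht⟩, if_pos (by omega : X ≠ 0), if_neg (by omega : ¬X = 1), if_pos ht,
        List.singleton_append, pv_join_two,
        if_neg (pv_append_ne_empty _ _ (pv_toStr_ne_empty T))]
      rw [show ("x + " : String) = "x" ++ " + " from by decide, ← String.append_assoc]

theorem pv_toStr_neg_head (X : Int) (hX : X < 0) :
    (PySem.Int.toStr X).toList = '-' :: Nat.toDigits 10 X.natAbs := by
  rw [PySem.Int.toList_toStr]; unfold PySem.Int.toChars; rw [if_pos hX]

-- with a negative x-coefficient sum the two renderings always differ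
theorem pv_format_neg (X T : Int) (hX : X < 0) :
    (if 1 < X ∧ T ≠ 0 then PySem.Int.toStr X ++ "x + " ++ PySem.Int.toStr T
     else if X ≠ 0 ∧ T ≠ 0 then "x + " ++ PySem.Int.toStr T
     else if 1 < X then PySem.Int.toStr X ++ "x"
     else if X ≠ 0 then "x"
     else PySem.Int.toStr T)
    ≠ (if PySem.Str.join " + "
          ((if X ≠ 0 then [if X = 1 then "x" else PySem.Int.toStr X ++ "x"] else []) ++
            (if T ≠ 0 then [PySem.Int.toStr T] else [])) = "" then "0"
       else PySem.Str.join " + "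
          ((if X ≠ 0 then [if X = 1 then "x" else PySem.Int.toStr X ++ "x"] else []) ++
            (if T ≠ 0 then [PySem.Int.toStr T] else []))) := by
  by_cases ht : T = 0
  · subst ht
    rw [if_neg (by simp : ¬(1 < X ∧ (0:Int) ≠ 0)), if_neg (by simp : ¬(X ≠ 0 ∧ (0:Int) ≠ 0)),
      if_neg (by omega : ¬1 < X), if_pos (by omega : X ≠ 0), if_pos (by omega : X ≠ 0),
      if_neg (by omega : ¬X = 1), if_neg (by simp : ¬(0:Int) ≠ 0), List.append_nil, pv_join_one,
      if_neg (pv_append_ne_empty _ "x" (by decide))]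
    intro he
    have h2 := congrArg (fun s => s.toList.length) he
    simp [String.toList_append, pv_toStr_neg_head X hX] at h2
  · rw [if_neg (by omega : ¬(1 < X ∧ T ≠ 0)), if_pos (⟨by omega, ht⟩ : X ≠ 0 ∧ T ≠ 0),
      if_pos (by omega : X ≠ 0), if_neg (by omega : ¬X = 1), if_pos ht,
      List.singleton_append, pv_join_two,
      if_neg (pv_append_ne_empty _ _ (pv_toStr_ne_empty T))]
    intro he
    have h2 := congrArg String.toList he
    simp [String.toList_append, pv_toStr_neg_head X hX] at h2

-- B's accumulator over the whole input is A's
theorem pv_st_eq (s : String) :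
    solution_alt_go s.toList [] false (0, 0)
      = (PySem.Str.split₀ s).foldl pvStepA (0, 0) := by
  have := pv_scan_eq s.toList [] (0, 0)
  simp only [List.filter_nil, List.reverse_nil, List.not_mem_nil, decide_false] at this
  rw [this, PySem.Str.split₀, PySem.Chars.split₀]

-- ===== VERDICT (by name: the statement is the Claim_ definition above) =====
theorem solution_spec : Claim_unchanged_solution := by
  intro polynomial _ hPre hD
  unfold D_solution pvXSumOf at hD
  unfold Pre_solution at hPre
  rw [pv_sum_eq _ hPre] at hD
  show solution polynomial = solution_alt polynomial
  unfold solution solution_alt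
  simp only [pv_stepA_def, pv_st_eq, pv_fold_eq, zero_add]
  exact pv_format _ _ (by omega)

theorem solution_changed : Claim_changed_solution := by
  unfold Claim_changed_solution
  refine ⟨by decide, by decide, by decide, by decide, by decide, by decide⟩

theorem solution_tight : Claim_exact_solution := by
  intro polynomial _ hPre hD
  unfold D_solution pvXSumOf at hD
  unfold Pre_solution at hPre
  rw [pv_sum_eq _ hPre] at hD
  show solution polynomial ≠ solution_alt polynomial
  unfold solution solution_alt
  simp only [pv_stepA_def, pv_st_eq, pv_fold_eq, zero_add]
  exact pv_format_neg _ _ hD
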